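-- pv_equiv track=rewrite | github.com/thinking-binaries/pico-energenie | src/energenie.py | highestClearBit
-- ===== SOURCE A (Python) =====
-- def highestClearBit(value:int, maxbits:int=15*8) -> int or None:
--     """Find the highest clear bit scanning MSB to LSB"""
--     mask = 1<<(maxbits-1)
--     bitno = maxbits-1
--     while mask != 0:
--         ##trace("compare %s with %s" %(hex(value), hex(mask)))
--         if (value & mask) == 0:
--             ##trace("zero at bit %d" % bitno)
--             return bitno
--         mask >>= 1
--         bitno-=1
--     ##trace("not found")
--     return None # NOT FOUND
-- ===== SOURCE B (Python) =====
-- def highestClearBit(value: int, maxbits: int = 15*8):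
--     """Highest clear bit = highest set bit of the complement within the window,
--     found by binary search instead of a per-bit scan."""
--     inv = ~value & ((1 << maxbits) - 1)
--     if inv == 0:
--         return None
--     pos = 0
--     n = maxbits          # invariant: 0 < inv < 2**n, answer = pos + highest set bit of inv
--     while n > 1:
--         h = n >> 1
--         top = inv >> h
--         if top:
--             inv = top
--             pos += h
--             n -= h
--         else:
--             n = h
--     return pos
-- ===== Notes on version B (the rewrite author's own statement) =====
-- stated objective: alternative
-- what changed: Replaces A's MSB-to-LSB per-bit scan with a closed-form complement mask (~value & ((1<<maxbits)-1)) followed by a binary search for that number's highest set bit.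
-- crash fix: On maxbits == 0 A raises ValueError (negative shift in 1<<(maxbits-1)) while B's window mask is empty and it returns None. — e.g. on highestClearBit(5, 0): A raises ValueError, B returns none
import Mathlib
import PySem

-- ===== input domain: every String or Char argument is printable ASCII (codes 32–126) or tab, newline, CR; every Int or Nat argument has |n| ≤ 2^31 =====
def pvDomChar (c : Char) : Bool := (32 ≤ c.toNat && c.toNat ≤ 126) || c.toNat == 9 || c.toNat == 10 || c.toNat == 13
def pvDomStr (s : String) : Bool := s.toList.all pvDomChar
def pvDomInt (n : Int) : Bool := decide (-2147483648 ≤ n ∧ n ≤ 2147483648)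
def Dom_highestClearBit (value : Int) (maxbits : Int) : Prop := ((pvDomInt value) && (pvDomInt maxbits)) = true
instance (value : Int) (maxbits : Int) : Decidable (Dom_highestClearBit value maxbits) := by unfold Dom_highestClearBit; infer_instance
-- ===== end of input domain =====

-- B replaces A's MSB-to-LSB per-bit scan with a complement mask plus a binary search for the
-- highest set bit (an alternative algorithm; equal on every input admitted by Pre_).

-- ===== PORT A =====
-- A's while loop; the fuel argument only bounds the iteration count (maxbits+1 iterations
-- suffice, since mask halves each turn), it never changes the computed value.
def hcbLoop (value : Int) : Nat → Int → Int → Option Int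
  | 0, _, _ => none
  | fuel+1, mask, bitno =>
    if mask = 0 then none
    else if PySem.Int.band value mask = 0 then some bitno
    else hcbLoop value fuel (mask >>> (1:Nat)) (bitno - 1)

-- mask = 1 << (maxbits-1); exact on Pre_ (1 ≤ maxbits), where Python's shift is defined
def highestClearBit (value : Int) (maxbits : Int) : Option Int :=
  hcbLoop value (maxbits.toNat + 1) ((1:Int) <<< (maxbits - 1).toNat) (maxbits - 1)

-- ===== PORT B =====
-- Source B's binary search for the highest set bit of inv; n, h are Python ints kept in
-- [0, maxbits], ported as Nat (exact on Pre_); h = n >> 1 is n / 2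
def hcbSearch (inv : Int) (n : Nat) (pos : Int) : Int :=
  if n ≤ 1 then pos
  else
    let h := n / 2
    let top := inv >>> h
    if top ≠ 0 then hcbSearch top (n - h) (pos + (h : Int)) else hcbSearch inv h pos
  termination_by n
  decreasing_by all_goals omega

-- inv = ~value & ((1 << maxbits) - 1); exact on Pre_ (1 ≤ maxbits) and on maxbits = 0
def highestClearBit_alt (value : Int) (maxbits : Int) : Option Int :=
  let inv := PySem.Int.band (Int.not value) (((1:Int) <<< maxbits.toNat) - 1)
  if inv = 0 then none
  else some (hcbSearch inv maxbits.toNat 0)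

-- ===== PRECONDITION & SPEC =====
-- Pre_ excludes maxbits ≤ 0, where Python A raises ValueError ('1 << (maxbits-1)' with a negative shift)
def Pre_highestClearBit (value : Int) (maxbits : Int) : Prop := 1 ≤ maxbits
instance (value : Int) (maxbits : Int) : Decidable (Pre_highestClearBit value maxbits) := by unfold Pre_highestClearBit; infer_instance
def pvWitness_highestClearBit : Int × Int := (5, 8)

-- On maxbits == 0 A raises ValueError (negative shift in 1<<(maxbits-1)) while B's window mask is empty and it returns None.
def Raises_highestClearBit (value : Int) (maxbits : Int) : Prop := maxbits = 0
instance (value : Int) (maxbits : Int) : Decidable (Raises_highestClearBit value maxbits) := by unfold Raises_highestClearBit; infer_instance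
def pvRaiseWitness_highestClearBit : Int × Int := (5, 0)
def pvRaiseWitnessOut_highestClearBit : Option Int := none

def Spec_highestClearBit (value : Int) (maxbits : Int) (out : Option Int) : Prop := out = highestClearBit_alt value maxbits
instance (value : Int) (maxbits : Int) (out : Option Int) : Decidable (Spec_highestClearBit value maxbits out) := by unfold Spec_highestClearBit; infer_instance

-- ===== CLAIM (what is proved, stated in full; the proofs are below) =====
def Claim_equal_highestClearBit : Prop := ∀ (value : Int) (maxbits : Int), Dom_highestClearBit value maxbits → Pre_highestClearBit value maxbits → Spec_highestClearBit value maxbits (highestClearBit value maxbits)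
def Claim_raises_highestClearBit : Prop := (∀ (value : Int) (maxbits : Int), Dom_highestClearBit value maxbits → Raises_highestClearBit value maxbits → ¬ Pre_highestClearBit value maxbits) ∧ (Dom_highestClearBit (pvRaiseWitness_highestClearBit.1) (pvRaiseWitness_highestClearBit.2) ∧ Raises_highestClearBit (pvRaiseWitness_highestClearBit.1) (pvRaiseWitness_highestClearBit.2) ∧ highestClearBit_alt (pvRaiseWitness_highestClearBit.1) (pvRaiseWitness_highestClearBit.2) = pvRaiseWitnessOut_highestClearBit)

-- ===== LEMMAS AND PROOFS =====

theorem int_not_eq (n : Int) : Int.not n = -n - 1 := by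
  cases n <;> simp [Int.not, Int.negSucc_eq] <;> ring

theorem one_shiftLeft_int (k : Nat) : (1:Int) <<< k = 2 ^ k := by
  rw [Int.shiftLeft_eq, one_mul]

theorem testBit_div (n i : Nat) : n.testBit i = decide (n / 2^i % 2 = 1) := by
  rw [Nat.testBit, Nat.shiftRight_eq_div_pow, Nat.one_and_eq_mod_two]
  rcases Nat.mod_two_eq_zero_or_one (n / 2^i) with h | h <;> simp [h]

theorem testBit_iff_le (a k : Nat) : a.testBit k = true ↔ 2^k ≤ a % 2^(k+1) := by
  have hp : 0 < 2^k := Nat.two_pow_pos k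
  have hdiv : a % 2^(k+1) / 2^k = a / 2^k % 2 := by
    rw [pow_succ]; exact Nat.mod_mul_right_div_self a (2^k) 2
  have hlt : a % 2^(k+1) < 2^k * 2 := by
    rw [← pow_succ]; exact Nat.mod_lt _ (Nat.two_pow_pos _)
  rw [testBit_div, decide_eq_true_iff]
  constructor
  · intro h
    have h1 : 1 ≤ a % 2^(k+1) / 2^k := by omega
    calc 2^k = 1 * 2^k := (one_mul _).symm
    _ ≤ a % 2^(k+1) := (Nat.le_div_iff_mul_le hp).mp h1
  · intro h
    have h1 : 1 ≤ a % 2^(k+1) / 2^k := (Nat.le_div_iff_mul_le hp).mpr (by omega)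
    have h2 : a % 2^(k+1) / 2^k < 2 := (Nat.div_lt_iff_lt_mul hp).mpr (by omega)
    omega

theorem emod_neg_succ (v : Int) (hv : 0 ≤ v) (N : Int) (hN : 0 < N) :
    (-v - 1) % N = N - 1 - v % N := by
  have hr0 : 0 ≤ v % N := Int.emod_nonneg v (ne_of_gt hN)
  have hrN : v % N < N := Int.emod_lt_of_pos v hN
  have hdecomp : N * (v / N) + v % N = v := Int.ediv_add_emod v N
  have : (-v - 1) = (N - 1 - v % N) + N * (-(v / N) - 1) := by linarith
  rw [this, Int.add_mul_emod_self_left, Int.emod_eq_of_lt (by omega) (by omega)]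

theorem cast_pow_two (n : Nat) : ((2^n : Nat) : Int) = (2:Int)^n := by push_cast; ring

theorem cast_mod_pow (a n : Nat) : ((a % 2^n : Nat) : Int) = (a : Int) % (2:Int)^n := by
  rw [Int.natCast_mod, cast_pow_two]

theorem toNat_two_pow (k : Nat) : ((2:Int)^k).toNat = 2^k := by
  rw [← cast_pow_two, Int.toNat_natCast]

theorem band_window (v : Int) (n : Nat) :
    PySem.Int.band (Int.not v) ((2:Int)^n - 1) = (-v - 1) % (2:Int)^n := by
  have hNn : (0:Int) < 2^n := by positivity
  have hp2 : (0:Nat) < 2^n := Nat.two_pow_pos n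
  rw [int_not_eq]
  rcases le_or_gt 0 v with hv | hv
  · -- v ≥ 0 : -v-1 < 0, use the mixed-sign branch of band
    rw [PySem.Int.band.eq_1]
    have h1 : ¬ (0:Int) ≤ -v - 1 := by omega
    have h2 : (0:Int) ≤ 2^n - 1 := by omega
    simp only [h1, h2, if_true, if_false]
    have h3 : (-(-v - 1) - 1) = v := by ring
    rw [h3]
    have h4 : ((2:Int)^n - 1).toNat = 2^n - 1 := by
      have := toNat_two_pow n
      omega
    have h5 : (2^n - 1) &&& v.toNat = v.toNat % 2^n := by
      rw [Nat.and_comm]; exact Nat.and_two_pow_sub_one_eq_mod _ n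
    rw [h4, h5, emod_neg_succ v hv _ hNn]
    have h6 : v % (2:Int)^n = ((v.toNat % 2^n : Nat) : Int) := by
      rw [cast_mod_pow, Int.toNat_of_nonneg hv]
    rw [h6, ← cast_pow_two]
    have h7 : v.toNat % 2^n < 2^n := Nat.mod_lt _ hp2
    omega
  · -- v < 0 : -v-1 ≥ 0, both operands nonnegative
    have ha : (0:Int) ≤ -v - 1 := by omega
    rw [PySem.Int.band_of_nonneg ha (by omega)]
    have h4 : ((2:Int)^n - 1).toNat = 2^n - 1 := by
      have := toNat_two_pow n
      omega
    rw [h4, Nat.and_two_pow_sub_one_eq_mod, cast_mod_pow, Int.toNat_of_nonneg ha]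

theorem band_testBit (v : Int) (k : Nat) :
    (PySem.Int.band v ((2:Int)^k) = 0) ↔ (2:Int)^k ≤ (-v - 1) % (2:Int)^(k+1) := by
  have hp : (0:Int) < 2^(k+1) := by positivity
  have hpk : (0:Int) < 2^k := by positivity
  have hx : (2:Int)^(k+1) = 2^k * 2 := by ring
  have hL : ((2^k : Nat) : Int) = (2:Int)^k := by push_cast; ring
  rcases le_or_gt 0 v with hv | hv
  · rw [PySem.Int.band_of_nonneg hv (by positivity), toNat_two_pow, Nat.and_two_pow,
      emod_neg_succ v hv _ hp]
    have h6 : v % (2:Int)^(k+1) = ((v.toNat % 2^(k+1) : Nat) : Int) := by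
      rw [cast_mod_pow, Int.toNat_of_nonneg hv]
    rw [h6]
    have hb := testBit_iff_le v.toNat k
    have hrlt : v.toNat % 2^(k+1) < 2^(k+1) := Nat.mod_lt _ (Nat.two_pow_pos _)
    have hrltI : ((v.toNat % 2^(k+1) : Nat) : Int) < (2:Int)^(k+1) := by exact_mod_cast hrlt
    cases ht : v.toNat.testBit k with
    | false =>
      rw [ht] at hb
      simp only [Bool.false_eq_true, false_iff] at hb
      have hI : ((v.toNat % 2^(k+1) : Nat) : Int) < (2:Int)^k := by
        exact_mod_cast Nat.lt_of_not_le hb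
      simp only [Bool.toNat_false, Nat.zero_mul, Nat.cast_zero]
      constructor
      · intro _; omega
      · intro _; trivial
    | true =>
      rw [ht] at hb
      have hI : (2:Int)^k ≤ ((v.toNat % 2^(k+1) : Nat) : Int) := by
        exact_mod_cast hb.mp rfl
      simp only [Bool.toNat_true, Nat.one_mul]
      rw [hL]
      constructor
      · intro h; omega
      · intro h; omega
  · -- v < 0
    have ha : (0:Int) ≤ -v - 1 := by omega
    rw [PySem.Int.band.eq_1]
    have h1 : ¬ (0:Int) ≤ v := by omega
    have h2 : (0:Int) ≤ 2^k := by positivity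
    simp only [h1, h2, if_true, if_false]
    rw [toNat_two_pow, Nat.two_pow_and]
    have h6 : (-v - 1) % (2:Int)^(k+1) = (((-v - 1).toNat % 2^(k+1) : Nat) : Int) := by
      rw [cast_mod_pow, Int.toNat_of_nonneg ha]
    rw [h6]
    have hb := testBit_iff_le (-v - 1).toNat k
    cases ht : (-v - 1).toNat.testBit k with
    | false =>
      rw [ht] at hb
      simp only [Bool.false_eq_true, false_iff] at hb
      have hI : (((-v - 1).toNat % 2^(k+1) : Nat) : Int) < (2:Int)^k := by
        exact_mod_cast Nat.lt_of_not_le hb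
      simp only [Bool.toNat_false, Nat.mul_zero, Nat.sub_zero]
      rw [hL]
      constructor
      · intro h; omega
      · intro h; omega
    | true =>
      rw [ht] at hb
      have hI : (2:Int)^k ≤ (((-v - 1).toNat % 2^(k+1) : Nat) : Int) := by
        exact_mod_cast hb.mp rfl
      simp only [Bool.toNat_true, Nat.mul_one, Nat.sub_self, Nat.cast_zero]
      constructor
      · intro _; omega
      · intro _; trivial

theorem bitLength_window (x : Int) (k : Nat) (h1 : (2:Int)^k ≤ x) (h2 : x < (2:Int)^(k+1)) :
    PySem.Int.bitLength x = k + 1 := by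
  have hx0 : (0:Int) < x := lt_of_lt_of_le (by positivity) h1
  have hxne : x ≠ 0 := ne_of_gt hx0
  have hna : x.natAbs = x.toNat := by omega
  have hlo : 2^k ≤ x.natAbs := by
    have : ((2^k : Nat) : Int) ≤ x := by push_cast; exact h1
    omega
  have hhi : x.natAbs < 2^(k+1) := by
    have : x < ((2^(k+1) : Nat) : Int) := by push_cast; exact h2
    omega
  have hub := PySem.Int.lt_two_pow_bitLength x
  have hlb := PySem.Int.two_pow_bitLength_le x hxne
  set b := PySem.Int.bitLength x with hbdef
  have hk_lt : k < b := by
    by_contra hc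
    have : 2^b ≤ 2^k := Nat.pow_le_pow_right (by norm_num) (by omega)
    omega
  have hble : b - 1 < k + 1 := by
    by_contra hc
    have : 2^(k+1) ≤ 2^(b-1) := Nat.pow_le_pow_right (by norm_num) (by omega)
    omega
  omega

theorem loop_eq (v : Int) (k : Nat) :
    hcbLoop v (k+2) ((2:Int)^k) (k : Int) =
      (if (-v - 1) % (2:Int)^(k+1) = 0 then none
       else some ((PySem.Int.bitLength ((-v - 1) % (2:Int)^(k+1)) : Int) - 1)) := by
  have hstep : ∀ (fuel : Nat) (mask bitno : Int),
      hcbLoop v (fuel+1) mask bitno =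
        if mask = 0 then none
        else if PySem.Int.band v mask = 0 then some bitno
        else hcbLoop v fuel (mask >>> (1:Nat)) (bitno - 1) := fun _ _ _ => rfl
  induction k with
  | zero =>
    have hbt := band_testBit v 0
    simp only [pow_zero, zero_add, pow_one] at hbt ⊢
    rw [hstep]
    have hs1 : ((1:Int) >>> (1:Nat)) = 0 := rfl
    rw [hs1, hstep]
    have hr0 : 0 ≤ (-v - 1) % (2:Int) := Int.emod_nonneg _ (by norm_num)
    have hr2 : (-v - 1) % (2:Int) < 2 := Int.emod_lt_of_pos _ (by norm_num)
    by_cases hb : PySem.Int.band v 1 = 0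
    · have h1 : (-v - 1) % (2:Int) = 1 := by have := hbt.mp hb; omega
      rw [h1]
      norm_num [hb]
      decide
    · have h1 : (-v - 1) % (2:Int) = 0 := by
        have : ¬ (1:Int) ≤ (-v - 1) % 2 := fun hc => hb (hbt.mpr hc)
        omega
      rw [h1]
      norm_num [hb]
  | succ k ih =>
    have hmne : ((2:Int)^(k+1)) ≠ 0 := by positivity
    have hbt := band_testBit v (k+1)
    rw [hstep, if_neg hmne]
    by_cases hb : PySem.Int.band v ((2:Int)^(k+1)) = 0
    · -- bit k+1 of value clear: A returns k+1, B's window value has top bit set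
      have htop : (2:Int)^(k+1) ≤ (-v - 1) % (2:Int)^(k+2) := hbt.mp hb
      have hlt : (-v - 1) % (2:Int)^(k+2) < (2:Int)^(k+2) :=
        Int.emod_lt_of_pos _ (by positivity)
      have hne : (-v - 1) % (2:Int)^(k+2) ≠ 0 := by
        have : (0:Int) < 2^(k+1) := by positivity
        omega
      have hbl := bitLength_window _ (k+1) htop hlt
      rw [if_pos hb]
      have hix : k+1+1 = k+2 := rfl
      rw [hix, if_neg hne, hbl]
      simp only [Option.some.injEq]
      push_cast; ring
    · -- bit k+1 of value set: recurse; the window value is unchanged by widening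
      have hnle : ¬ (2:Int)^(k+1) ≤ (-v - 1) % (2:Int)^(k+2) := fun hc => hb (hbt.mpr hc)
      have hsh : ((2:Int)^(k+1)) >>> (1:Nat) = (2:Int)^k := by
        rw [Int.shiftRight_eq_div_pow]
        norm_num
        rw [pow_succ]
        exact Int.mul_ediv_cancel _ (by norm_num)
      have hbn : ((k+1 : Nat) : Int) - 1 = (k : Int) := by push_cast; ring
      have hsame : (-v - 1) % (2:Int)^(k+1) = (-v - 1) % (2:Int)^(k+2) := by
        have hdvd : ((2:Int)^(k+1)) ∣ ((2:Int)^(k+2)) := pow_dvd_pow 2 (by omega)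
        have h1 := Int.emod_emod_of_dvd (-v - 1) hdvd
        have h2 : (-v - 1) % (2:Int)^(k+2) % (2:Int)^(k+1) = (-v - 1) % (2:Int)^(k+2) := by
          apply Int.emod_eq_of_lt
          · exact Int.emod_nonneg _ (by positivity)
          · omega
        rw [← h1, h2]
      rw [if_neg hb, hsh, hbn]
      have hix : k+1+1 = k+2 := rfl
      rw [ih, hsame, hix]

-- ===== VERDICT (by name: the statement is the Claim_ definition above) =====

theorem hcbSearch_window (n : Nat) : ∀ (inv pos : Int) (b : Nat),
    ((2^b : Nat) : Int) ≤ inv → inv < ((2^(b+1) : Nat) : Int) →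
    inv < ((2^n : Nat) : Int) → b < n → hcbSearch inv n pos = pos + (b : Int) := by
  induction n using Nat.strong_induction_on with
  | _ n ih =>
    intro inv pos b hb1 hb2 hn hbn
    rw [hcbSearch]
    by_cases h1 : n ≤ 1
    · have hb0 : b = 0 := by omega
      simp [h1, hb0]
    · simp only [h1, if_false]
      have hn2 : 2 ≤ n := by omega
      have hh1 : 1 ≤ n / 2 := by omega
      have hhn : n / 2 < n := by omega
      have hinv0 : (0:Int) < inv := lt_of_lt_of_le (by positivity) hb1
      have hsh : inv >>> (n / 2) = inv / ((2^(n/2) : Nat) : Int) :=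
        Int.shiftRight_eq_div_pow inv (n / 2)
      by_cases hbh : n / 2 ≤ b
      · -- the top half is nonempty: the highest set bit lies at b - n/2 of inv >> (n/2)
        have hpow : (2^(b - n/2) * 2^(n/2) : Nat) = 2^b := by
          rw [← pow_add]; congr 1; omega
        have htge : ((2^(b - n/2) : Nat) : Int) ≤ inv / ((2^(n/2) : Nat) : Int) := by
          rw [Int.le_ediv_iff_mul_le (by positivity)]
          calc ((2^(b - n/2) : Nat) : Int) * ((2^(n/2) : Nat) : Int)
              = ((2^(b - n/2) * 2^(n/2) : Nat) : Int) := by push_cast; ring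
            _ = ((2^b : Nat) : Int) := by rw [hpow]
            _ ≤ inv := hb1
        have hpow2 : (2^(b - n/2 + 1) * 2^(n/2) : Nat) = 2^(b+1) := by
          rw [← pow_add]; congr 1; omega
        have htlt : inv / ((2^(n/2) : Nat) : Int) < ((2^(b - n/2 + 1) : Nat) : Int) := by
          rw [Int.ediv_lt_iff_lt_mul (by positivity)]
          calc inv < ((2^(b+1) : Nat) : Int) := hb2
            _ = ((2^(b - n/2 + 1) * 2^(n/2) : Nat) : Int) := by rw [hpow2]
            _ = ((2^(b - n/2 + 1) : Nat) : Int) * ((2^(n/2) : Nat) : Int) := by push_cast; ring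
        have hpow3 : (2^(n - n/2) * 2^(n/2) : Nat) = 2^n := by
          rw [← pow_add]; congr 1; omega
        have htn : inv / ((2^(n/2) : Nat) : Int) < ((2^(n - n/2) : Nat) : Int) := by
          rw [Int.ediv_lt_iff_lt_mul (by positivity)]
          calc inv < ((2^n : Nat) : Int) := hn
            _ = ((2^(n - n/2) * 2^(n/2) : Nat) : Int) := by rw [hpow3]
            _ = ((2^(n - n/2) : Nat) : Int) * ((2^(n/2) : Nat) : Int) := by push_cast; ring
        have htne : inv >>> (n / 2) ≠ 0 := by
          rw [hsh]
          have : (0:Int) < ((2^(b - n/2) : Nat) : Int) := by positivity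
          omega
        rw [hsh] at htne ⊢
        rw [if_pos htne]
        rw [ih (n - n/2) (by omega) _ _ (b - n/2) htge htlt htn (by omega)]
        have : ((b - n/2 : Nat) : Int) = (b : Int) - ((n/2 : Nat) : Int) := by
          push_cast [Nat.cast_sub hbh]; ring
        rw [this]; ring
      · -- b < n/2 : the top half of the window is all zeros
        have hble : (2^(b+1) : Nat) ≤ 2^(n/2) := Nat.pow_le_pow_right (by norm_num) (by omega)
        have htz : inv >>> (n / 2) = 0 := by
          rw [hsh]
          apply Int.ediv_eq_zero_of_lt (le_of_lt hinv0)
          calc inv < ((2^(b+1) : Nat) : Int) := hb2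
            _ ≤ ((2^(n/2) : Nat) : Int) := by exact_mod_cast hble
        simp only [htz, ne_eq, not_true_eq_false, if_false]
        exact ih (n/2) hhn inv pos b hb1 hb2
          (lt_of_lt_of_le hb2 (by exact_mod_cast hble)) (by omega)

theorem highestClearBit_spec : Claim_equal_highestClearBit := by
  intro v m _ hpre
  unfold Pre_highestClearBit at hpre
  unfold Spec_highestClearBit highestClearBit highestClearBit_alt
  set k : Nat := (m - 1).toNat with hk
  have hm1 : m - 1 = (k : Int) := by omega
  have hmt : m.toNat = k + 1 := by omega
  rw [hm1, hmt, one_shiftLeft_int, one_shiftLeft_int]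
  simp only []
  rw [band_window v (k+1), loop_eq v k]
  set inv : Int := (-v - 1) % (2:Int)^(k+1) with hinv
  by_cases hz : inv = 0
  · simp [hz]
  · simp only [hz, if_false]
    have hinv0 : 0 < inv :=
      lt_of_le_of_ne (Int.emod_nonneg _ (by positivity)) (Ne.symm hz)
    have hinvlt : inv < (2:Int)^(k+1) := Int.emod_lt_of_pos _ (by positivity)
    have hna : inv.natAbs = inv.toNat := by omega
    set bl : Nat := PySem.Int.bitLength inv with hbl
    have hub : inv.natAbs < 2^bl := PySem.Int.lt_two_pow_bitLength inv
    have hlb : 2^(bl-1) ≤ inv.natAbs := PySem.Int.two_pow_bitLength_le inv hz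
    have hbl1 : 1 ≤ bl := by
      by_contra hc
      have hbl0 : bl = 0 := by omega
      rw [hbl0] at hub
      omega
    have hcast : inv = ((inv.toNat : Nat) : Int) := (Int.toNat_of_nonneg (le_of_lt hinv0)).symm
    have hw1 : ((2^(bl-1) : Nat) : Int) ≤ inv := by
      rw [hcast]; exact_mod_cast (hna ▸ hlb)
    have hw2 : inv < ((2^(bl-1+1) : Nat) : Int) := by
      have : bl - 1 + 1 = bl := by omega
      rw [this, hcast]; exact_mod_cast (hna ▸ hub)
    have hwn : inv < ((2^(k+1) : Nat) : Int) := by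
      rw [cast_pow_two]; exact hinvlt
    have hblk : bl - 1 < k + 1 := by
      by_contra hc
      have : (2^(k+1) : Nat) ≤ 2^(bl-1) := Nat.pow_le_pow_right (by norm_num) (by omega)
      have : ((2^(k+1) : Nat) : Int) ≤ ((2^(bl-1) : Nat) : Int) := by exact_mod_cast this
      omega
    rw [hcbSearch_window (k+1) inv 0 (bl-1) hw1 hw2 hwn hblk]
    have : ((bl - 1 : Nat) : Int) = (bl : Int) - 1 := by push_cast [Nat.cast_sub hbl1]; ring
    rw [this]; ring_nf

@[simp] theorem highestClearBit_raises : Claim_raises_highestClearBit := by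
  unfold Claim_raises_highestClearBit
  constructor
  · intro v m _ hr hp
    unfold Raises_highestClearBit at hr
    unfold Pre_highestClearBit at hp
    omega
  · refine ⟨by decide, by decide, by decide⟩
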